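-- pv_equiv track=rewrite | github.com/rzshrote/pybrops | pybrops/core/util/crossix.py | threewayix_asymab_uniqab_uniqc
-- ===== SOURCE A (Python) =====
-- from typing import Generator
--
-- def threewayix_asymab_uniqab_uniqc(ntaxa: int) -> Generator:
--     """
--     Generate indices for three-way parent crosses with the following constraints:
--
--     1) Assume asymmetric mate pairings for (AxB) cross: (A x B) != (B x A)
--     2) Disallow (AxB) selfing, allow (AxB) outcrossing
--     3) Only permit outcrossing for the recurrent parent: C != (A or B).
--
--     Parameters
--     ----------
--     ntaxa : int
--         Number of taxa eligible to serve as parents.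
--
--     Yields
--     ------
--     out : tuple
--         Tuple of indices. Indices are (recurrent,female,male) == (C x (A x B)).
--     """
--     if ntaxa <= 2:
--         yield from ()
--     for recurrent in range(ntaxa):
--         for female in range(recurrent):
--             for male in range(female):
--                 yield (recurrent,female,male)
--             for male in range(female+1,recurrent):
--                 yield (recurrent,female,male)
--             for male in range(recurrent+1,ntaxa):
--                 yield (recurrent,female,male)
--         for female in range(recurrent+1,ntaxa):
--             for male in range(recurrent):
--                 yield (recurrent,female,male)
--             for male in range(recurrent+1,female):
--                 yield (recurrent,female,male)
--             for male in range(female+1,ntaxa):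
--                 yield (recurrent,female,male)
-- ===== SOURCE B (Python) =====
-- from typing import Generator
--
-- def threewayix_asymab_uniqab_uniqc(ntaxa: int) -> Generator:
--     """
--     Generate indices (recurrent, female, male) for three-way crosses:
--     all ordered triples of distinct indices in [0, ntaxa), lexicographic.
--     """
--     yield from ((recurrent, female, male)
--                 for recurrent in range(ntaxa)
--                 for female in range(ntaxa)
--                 for male in range(ntaxa)
--                 if female != recurrent and male != recurrent and male != female)
-- ===== Notes on version B (the rewrite author's own statement) =====
-- stated objective: simpler
-- what changed: B enumerates the full ntaxa^3 cube once and filters out triples with any equal components, replacing A's six hand-split male/female sub-range loops; the emission order (lexicographic over distinct triples) is identical.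
import Mathlib
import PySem

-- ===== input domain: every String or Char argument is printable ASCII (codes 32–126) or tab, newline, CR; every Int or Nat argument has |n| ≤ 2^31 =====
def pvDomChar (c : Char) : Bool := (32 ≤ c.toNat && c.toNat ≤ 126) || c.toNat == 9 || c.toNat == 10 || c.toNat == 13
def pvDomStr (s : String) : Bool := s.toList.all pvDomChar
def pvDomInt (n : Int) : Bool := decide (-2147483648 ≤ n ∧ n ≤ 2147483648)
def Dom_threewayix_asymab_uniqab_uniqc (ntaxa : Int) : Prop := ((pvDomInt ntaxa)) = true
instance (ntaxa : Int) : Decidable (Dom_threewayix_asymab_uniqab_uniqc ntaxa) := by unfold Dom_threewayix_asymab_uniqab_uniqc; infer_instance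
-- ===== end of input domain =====

-- B replaces A's six hand-split sub-range loops by one filtered pass over the full
-- ntaxa^3 cube (same emission order, same O(n^3) cost); objective: simpler.

-- ===== PORT A =====
-- A's 'if ntaxa <= 2: yield from ()' yields nothing and falls through: a no-op prefix.
def threewayix_asymab_uniqab_uniqc (ntaxa : Int) : List (Int × Int × Int) :=
  (if ntaxa ≤ 2 then ([] : List (Int × Int × Int)) else []) ++
  (PySem.List.pyRange 0 ntaxa 1).flatMap (fun recurrent =>
    (PySem.List.pyRange 0 recurrent 1).flatMap (fun female =>
      (PySem.List.pyRange 0 female 1).map (fun male => (recurrent, female, male)) ++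
      (PySem.List.pyRange (female + 1) recurrent 1).map (fun male => (recurrent, female, male)) ++
      (PySem.List.pyRange (recurrent + 1) ntaxa 1).map (fun male => (recurrent, female, male))) ++
    (PySem.List.pyRange (recurrent + 1) ntaxa 1).flatMap (fun female =>
      (PySem.List.pyRange 0 recurrent 1).map (fun male => (recurrent, female, male)) ++
      (PySem.List.pyRange (recurrent + 1) female 1).map (fun male => (recurrent, female, male)) ++
      (PySem.List.pyRange (female + 1) ntaxa 1).map (fun male => (recurrent, female, male))))

-- ===== PORT B =====
def threewayix_asymab_uniqab_uniqc_alt (ntaxa : Int) : List (Int × Int × Int) :=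
  (PySem.List.pyRange 0 ntaxa 1).flatMap (fun recurrent =>
    (PySem.List.pyRange 0 ntaxa 1).flatMap (fun female =>
      (PySem.List.pyRange 0 ntaxa 1).flatMap (fun male =>
        if female ≠ recurrent ∧ male ≠ recurrent ∧ male ≠ female then
          [(recurrent, female, male)] else [])))

-- ===== PRECONDITION & SPEC =====
def Spec_threewayix_asymab_uniqab_uniqc (ntaxa : Int) (out : List (Int × Int × Int)) : Prop := out = threewayix_asymab_uniqab_uniqc_alt ntaxa
instance (ntaxa : Int) (out : List (Int × Int × Int)) : Decidable (Spec_threewayix_asymab_uniqab_uniqc ntaxa out) := by unfold Spec_threewayix_asymab_uniqab_uniqc; infer_instance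

-- ===== CLAIM (what is proved, stated in full; the proofs are below) =====
def Claim_equal_threewayix_asymab_uniqab_uniqc : Prop := ∀ (ntaxa : Int), Dom_threewayix_asymab_uniqab_uniqc ntaxa → Spec_threewayix_asymab_uniqab_uniqc ntaxa (threewayix_asymab_uniqab_uniqc ntaxa)

-- ===== LEMMAS AND PROOFS =====

theorem pv_flatMap_congr {α β : Type} (l : List α) (f g : α → List β)
    (h : ∀ x ∈ l, f x = g x) : l.flatMap f = l.flatMap g := by
  induction l with
  | nil => rfl
  | cons a t ih =>
    simp only [List.flatMap_cons]
    rw [h a (List.mem_cons_self), ih (fun x hx => h x (List.mem_cons_of_mem a hx))]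

theorem pv_flatMap_const_nil {α β : Type} (l : List α) :
    l.flatMap (fun _ => ([] : List β)) = [] := by
  induction l with
  | nil => rfl
  | cons a t ih => simp [ih]

theorem pv_guard_map {β : Type} (l : List Int) (c : Int → Prop) [DecidablePred c]
    (g : Int → β) (h : ∀ x ∈ l, c x) :
    l.flatMap (fun x => if c x then [g x] else []) = l.map g := by
  induction l with
  | nil => rfl
  | cons a t ih =>
    simp only [List.flatMap_cons, List.map_cons, if_pos (h a (List.mem_cons_self))]
    rw [ih (fun x hx => h x (List.mem_cons_of_mem a hx))]
    rfl

theorem pv_main (n : Int) :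
    threewayix_asymab_uniqab_uniqc n = threewayix_asymab_uniqab_uniqc_alt n := by
  unfold threewayix_asymab_uniqab_uniqc threewayix_asymab_uniqab_uniqc_alt
  rw [ite_self, List.nil_append]
  apply pv_flatMap_congr
  intro r hr
  obtain ⟨hr0, hrn⟩ := (PySem.List.mem_pyRange_one).mp hr
  have hsplit : PySem.List.pyRange 0 n 1 =
      PySem.List.pyRange 0 r 1 ++ r :: PySem.List.pyRange (r + 1) n 1 := by
    rw [PySem.List.pyRange_one_append 0 r n hr0 (le_of_lt hrn),
        PySem.List.pyRange_one_cons hrn]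
  rw [hsplit]
  simp only [List.flatMap_append, List.flatMap_cons, ne_eq,
    not_true_eq_false, false_and, and_false, if_false, pv_flatMap_const_nil,
    List.nil_append, List.append_nil]
  congr 1
  · -- female < recurrent block
    apply pv_flatMap_congr
    intro f hf
    obtain ⟨hf0, hfr⟩ := (PySem.List.mem_pyRange_one).mp hf
    have hfsplit : PySem.List.pyRange 0 r 1 =
        PySem.List.pyRange 0 f 1 ++ f :: PySem.List.pyRange (f + 1) r 1 := by
      rw [PySem.List.pyRange_one_append 0 f r hf0 (le_of_lt hfr),
          PySem.List.pyRange_one_cons hfr]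
    rw [hfsplit]
    simp only [List.flatMap_append, List.flatMap_cons]
    have h1 : (PySem.List.pyRange 0 f 1).flatMap
        (fun m => if f ≠ r ∧ m ≠ r ∧ m ≠ f then [(r, f, m)] else [])
        = (PySem.List.pyRange 0 f 1).map (fun m => (r, f, m)) := by
      apply pv_guard_map
      intro m hm
      obtain ⟨hm0, hmf⟩ := (PySem.List.mem_pyRange_one).mp hm
      refine ⟨by omega, by omega, by omega⟩
    have h2 : (PySem.List.pyRange (f + 1) r 1).flatMap
        (fun m => if f ≠ r ∧ m ≠ r ∧ m ≠ f then [(r, f, m)] else [])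
        = (PySem.List.pyRange (f + 1) r 1).map (fun m => (r, f, m)) := by
      apply pv_guard_map
      intro m hm
      obtain ⟨hm1, hm2⟩ := (PySem.List.mem_pyRange_one).mp hm
      refine ⟨by omega, by omega, by omega⟩
    have h3 : (PySem.List.pyRange (r + 1) n 1).flatMap
        (fun m => if f ≠ r ∧ m ≠ r ∧ m ≠ f then [(r, f, m)] else [])
        = (PySem.List.pyRange (r + 1) n 1).map (fun m => (r, f, m)) := by
      apply pv_guard_map
      intro m hm
      obtain ⟨hm1, hm2⟩ := (PySem.List.mem_pyRange_one).mp hm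
      refine ⟨by omega, by omega, by omega⟩
    rw [h1, h2, h3]
    simp [List.append_assoc]
  · -- female > recurrent block
    apply pv_flatMap_congr
    intro f hf
    obtain ⟨hf1, hf2⟩ := (PySem.List.mem_pyRange_one).mp hf
    have hfsplit : PySem.List.pyRange (r + 1) n 1 =
        PySem.List.pyRange (r + 1) f 1 ++ f :: PySem.List.pyRange (f + 1) n 1 := by
      rw [PySem.List.pyRange_one_append (r + 1) f n (by omega) (le_of_lt hf2),
          PySem.List.pyRange_one_cons hf2]
    rw [hfsplit]
    simp only [List.flatMap_append, List.flatMap_cons]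
    have h1 : (PySem.List.pyRange 0 r 1).flatMap
        (fun m => if f ≠ r ∧ m ≠ r ∧ m ≠ f then [(r, f, m)] else [])
        = (PySem.List.pyRange 0 r 1).map (fun m => (r, f, m)) := by
      apply pv_guard_map
      intro m hm
      obtain ⟨hm0, hmr⟩ := (PySem.List.mem_pyRange_one).mp hm
      refine ⟨by omega, by omega, by omega⟩
    have h2 : (PySem.List.pyRange (r + 1) f 1).flatMap
        (fun m => if f ≠ r ∧ m ≠ r ∧ m ≠ f then [(r, f, m)] else [])
        = (PySem.List.pyRange (r + 1) f 1).map (fun m => (r, f, m)) := by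
      apply pv_guard_map
      intro m hm
      obtain ⟨hm1, hm2⟩ := (PySem.List.mem_pyRange_one).mp hm
      refine ⟨by omega, by omega, by omega⟩
    have h3 : (PySem.List.pyRange (f + 1) n 1).flatMap
        (fun m => if f ≠ r ∧ m ≠ r ∧ m ≠ f then [(r, f, m)] else [])
        = (PySem.List.pyRange (f + 1) n 1).map (fun m => (r, f, m)) := by
      apply pv_guard_map
      intro m hm
      obtain ⟨hm1, hm2⟩ := (PySem.List.mem_pyRange_one).mp hm
      refine ⟨by omega, by omega, by omega⟩
    rw [h1, h2, h3]
    simp [List.append_assoc]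

-- ===== VERDICT (by name: the statement is the Claim_ definition above) =====
theorem threewayix_asymab_uniqab_uniqc_spec : Claim_equal_threewayix_asymab_uniqab_uniqc := by
  intro n _
  unfold Spec_threewayix_asymab_uniqab_uniqc
  exact pv_main n
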